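-- pv_equiv track=rewrite | github.com/enricotomasi/GeeksforGeeks_problems | Easy/Max Length Removal.py | longestNull
-- ===== SOURCE A (Python) =====
-- def longestNull(S):
--     # Your code goes here
--     mappa = []
--
--     mappa.append(["-", -1])
--     maxlen = 0
--
--     for i in range(len(S)):
--         mappa.append([S[i], i])
--         while len(mappa) >= 3 and mappa[len(mappa) - 3][0] == "1" and mappa[len(mappa) - 2][0] == "0" and mappa[len(mappa) - 1][0] == "0":
--             for j in range(3):
--                 mappa.pop()
--
--         tmp = mappa[-1]
--         maxlen = max(maxlen, i - tmp[1])
--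
--     return maxlen
-- ===== SOURCE B (Python) =====
-- def longestNull(S):
--     # Right-to-left reduction: prepending a character to an irreducible suffix can
--     # trigger at most one "100" removal, so a single check (no while loop) suffices;
--     # the answer is then read off in a second pass as the widest gap between
--     # consecutive surviving indices (virtual boundaries -1 and len(S)).
--     n = len(S)
--     acc = []  # surviving indices of the processed suffix, smallest index last
--     for i in range(n - 1, -1, -1):
--         if len(acc) >= 2 and S[i] == '1' and S[acc[-1]] == '0' and S[acc[-2]] == '0':
--             acc.pop()
--             acc.pop()
--         else:
--             acc.append(i)
--     best, prev = 0, -1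
--     for idx in acc[::-1] + [n]:
--         best = max(best, idx - prev - 1)
--         prev = idx
--     return best
-- ===== Notes on version B (the rewrite author's own statement) =====
-- stated objective: faster
-- what changed: B scans the string right-to-left, prepending each character to an already-irreducible suffix so one single conditional (no inner while loop, no pair boxing, no per-character running maximum) performs each removal of the pattern 100, and then computes the answer in a separate second pass as the widest gap between consecutive surviving indices with virtual boundaries -1 and len(S); A scans left-to-right with a sentinel (char,index) pair stack, an inner while loop and an inline running maximum. …
import Mathlib
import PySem

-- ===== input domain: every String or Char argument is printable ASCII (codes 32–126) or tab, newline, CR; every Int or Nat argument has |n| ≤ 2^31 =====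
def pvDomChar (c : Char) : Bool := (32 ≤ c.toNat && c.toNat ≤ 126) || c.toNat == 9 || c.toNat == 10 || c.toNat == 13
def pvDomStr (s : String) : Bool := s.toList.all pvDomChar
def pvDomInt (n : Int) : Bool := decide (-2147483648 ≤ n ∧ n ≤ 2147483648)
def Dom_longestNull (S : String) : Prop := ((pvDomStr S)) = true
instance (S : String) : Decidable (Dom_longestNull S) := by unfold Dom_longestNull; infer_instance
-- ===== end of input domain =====

-- B scans the string RIGHT-TO-LEFT, prepending to an already-irreducible suffix, where a single
-- conditional (no while loop) performs the "100" removal, and then reads the answer off in a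
-- separate second pass as the widest gap between consecutive surviving indices; A scans
-- left-to-right with a sentinel pair-stack, an inner while loop and an inline running maximum
-- (objective: faster by a constant factor — the rewriting "100" → ε has no critical pairs, so the traversal
-- order does not change the surviving characters; that independence is what is proved here).

-- ===== PORT A =====
-- A's while loop: pop three entries while the top three stack entries read "1","0","0"
-- (stack head = Python's mappa[-1], i.e. the most recently appended entry).
def reduceA (m : List (Char × Int)) : List (Char × Int) :=
  match m with
  | (c0, i0) :: (c1, i1) :: (c2, i2) :: rest =>
      if c2 == '1' && c1 == '0' && c0 == '0' then reduceA rest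
      else (c0, i0) :: (c1, i1) :: (c2, i2) :: rest
  | m => m

-- one iteration of A's 'for i in range(len(S))' body, iterated over the pairs (i, S[i])
def stepA (st : List (Char × Int) × Int) (p : Int × Char) : List (Char × Int) × Int :=
  let m := reduceA ((p.2, p.1) :: st.1)
  let tmp := m.headD ('-', -1)
  (m, max st.2 (p.1 - tmp.2))

def longestNull (S : String) : Int :=
  ((PySem.List.enumerate S.toList 0).foldl stepA ([('-', -1)], 0)).2

-- ===== PORT B =====
-- B's loop body for 'for i in range(n-1, -1, -1)': the stack of surviving indices of the
-- processed suffix is kept head-first (head = smallest index), so append/pop at the Python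
-- list's end become cons/uncons at the head; S[i], S[acc[-1]], S[acc[-2]] via pyGet?.
def rstepB (cs : List Char) (i : Int) (acc : List Int) : List Int :=
  match acc with
  | a :: b :: t =>
      if PySem.List.pyGet? cs i == some '1' && PySem.List.pyGet? cs a == some '0'
          && PySem.List.pyGet? cs b == some '0' then t
      else i :: a :: b :: t
  | acc => i :: acc

-- one iteration of B's second pass: best = max(best, idx - prev - 1); prev = idx
def gapStep (bp : Int × Int) (idx : Int) : Int × Int :=
  (max bp.1 (idx - bp.2 - 1), idx)

def longestNull_alt (S : String) : Int :=
  let cs := S.toList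
  let n : Int := cs.length
  -- pass 1: right-to-left reduction (Python's descending loop = foldr over the ascending range)
  let acc := (PySem.List.pyRange 0 n 1).foldr (rstepB cs) []
  -- pass 2: for idx in acc[::-1] + [n]  (acc is already ascending in this representation)
  ((acc ++ [n]).foldl gapStep (0, -1)).1

-- ===== PRECONDITION & SPEC =====
def Spec_longestNull (S : String) (out : Int) : Prop := out = longestNull_alt S
instance (S : String) (out : Int) : Decidable (Spec_longestNull S out) := by unfold Spec_longestNull; infer_instance

-- ===== CLAIM (what is proved, stated in full; the proofs are below) =====
def Claim_equal_longestNull : Prop := ∀ (S : String), Dom_longestNull S → Spec_longestNull S (longestNull S)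

-- ===== LEMMAS AND PROOFS =====

-- the largest gap a-b-1 over consecutive pairs of a (decreasing) boundary list
def maxGap : List Int → Int
  | a :: b :: t => max (a - b - 1) (maxGap (b :: t))
  | _ => 0

-- the stack pair A keeps for a surviving index j
def keyA (cs : List Char) (j : Int) : Char × Int := (cs.getD j.toNat ' ', j)

-- "the window whose string reads S[a] S[b] S[c] is the redex 100"
def cond3 (cs : List Char) (a b c : Int) : Bool :=
  PySem.List.pyGet? cs a == some '1' && PySem.List.pyGet? cs b == some '0'
    && PySem.List.pyGet? cs c == some '0'

-- index-level version of A's while loop (stack head-first, head = most recent)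
def reduceB (cs : List Char) (st : List Int) : List Int :=
  match st with
  | t0 :: t1 :: t2 :: rest =>
      if cond3 cs t2 t1 t0 then reduceB cs rest
      else t0 :: t1 :: t2 :: rest
  | st => st

def stepB (cs : List Char) (st : List Int) (p : Int × Char) : List Int :=
  reduceB cs (p.1 :: st)

def pushB (cs : List Char) (st : List Int) (j : Int) : List Int :=
  reduceB cs (j :: st)

-- single-step push (what pushB does on an irreducible stack)
def push1 (cs : List Char) (st : List Int) (j : Int) : List Int :=
  match st with
  | t0 :: t1 :: r => if cond3 cs t1 t0 j then r else j :: t0 :: t1 :: r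
  | st => j :: st

-- the (descending, head-first) stack is irreducible: no window is a redex
def irrD (cs : List Char) : List Int → Bool
  | t0 :: t1 :: t2 :: r => !cond3 cs t2 t1 t0 && irrD cs (t1 :: t2 :: r)
  | _ => true

theorem maxGap_cons_cons (a b : Int) (t : List Int) :
    maxGap (a :: b :: t) = max (a - b - 1) (maxGap (b :: t)) := rfl

theorem maxGap_nonneg : ∀ (L : List Int), 0 ≤ maxGap L
  | [] => le_refl 0
  | [_] => le_refl 0
  | a :: b :: t => by
      rw [maxGap_cons_cons]
      have := maxGap_nonneg (b :: t)
      omega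

theorem maxGap_merge : ∀ (zs : List Int) (i b : Int) (rest : List Int),
    (∀ z ∈ zs, b < z ∧ z < i) → b < i → List.Pairwise (fun x y => y < x) zs →
    max (maxGap (i :: zs ++ b :: rest)) (i - b) = max (i - b) (maxGap (b :: rest)) := by
  intro zs
  induction zs with
  | nil =>
    intro i b rest _ hib _
    have h1 : maxGap (i :: [] ++ b :: rest) = max (i - b - 1) (maxGap (b :: rest)) := rfl
    rw [h1]
    omega
  | cons z zs ih =>
    intro i b rest hmem hib hpw
    have hz := hmem z (by simp)
    have h1 : maxGap (i :: (z :: zs) ++ b :: rest)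
        = max (i - z - 1) (maxGap (z :: zs ++ b :: rest)) := by
      simp only [List.cons_append, maxGap_cons_cons]
    have h2 := ih z b rest
      (fun z' hz' => ⟨(hmem z' (by simp [hz'])).1, (List.pairwise_cons.mp hpw).1 z' hz'⟩)
      hz.1 (List.pairwise_cons.mp hpw).2
    rw [h1]
    omega

theorem maxGap_append_pair : ∀ (L : List Int) (x p : Int),
    maxGap (L ++ [x, p]) = max (maxGap (L ++ [x])) (x - p - 1) := by
  intro L
  induction L with
  | nil =>
    intro x p
    simp only [List.nil_append, maxGap_cons_cons]
    have h1 : maxGap [p] = 0 := rfl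
    have h2 : maxGap [x] = 0 := rfl
    rw [h1, h2]
    omega
  | cons a L ih =>
    intro x p
    cases L with
    | nil =>
      simp only [List.cons_append, List.nil_append, maxGap_cons_cons]
      have h1 : maxGap [p] = 0 := rfl
      have h2 : maxGap [x] = 0 := rfl
      rw [h1, h2]
      omega
    | cons c L' =>
      have h1 : maxGap ((a :: c :: L') ++ [x, p])
          = max (a - c - 1) (maxGap ((c :: L') ++ [x, p])) := by
        simp only [List.cons_append, maxGap_cons_cons]
      have h2 : maxGap ((a :: c :: L') ++ [x])
          = max (a - c - 1) (maxGap ((c :: L') ++ [x])) := by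
        simp only [List.cons_append, maxGap_cons_cons]
      rw [h1, h2, ih x p]
      omega

theorem gapFold : ∀ (xs : List Int) (b p : Int), 0 ≤ b →
    (xs.foldl gapStep (b, p)).1 = max b (maxGap ((p :: xs).reverse)) := by
  intro xs
  induction xs with
  | nil =>
    intro b p hb
    simp only [List.foldl_nil, List.reverse_cons, List.reverse_nil, List.nil_append]
    have h1 : maxGap [p] = 0 := rfl
    rw [h1]
    omega
  | cons x xs ih =>
    intro b p hb
    have h2 := ih (max b (x - p - 1)) x (by omega)
    have e : (p :: x :: xs).reverse = xs.reverse ++ [x, p] := by simp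
    have e2 : (x :: xs).reverse = xs.reverse ++ [x] := by simp
    have h3 : maxGap ((p :: x :: xs).reverse) = max (maxGap ((x :: xs).reverse)) (x - p - 1) := by
      rw [e, maxGap_append_pair, ← e2]
    have hg : gapStep (b, p) x = (max b (x - p - 1), x) := rfl
    rw [List.foldl_cons, hg, h2, h3]
    omega

theorem reduceB_suffix (cs : List Char) : ∀ (st : List Int), (reduceB cs st) <:+ st
  | [] => List.suffix_refl _
  | [_] => List.suffix_refl _
  | [_, _] => List.suffix_refl _
  | t0 :: t1 :: t2 :: rest => by
      simp only [reduceB]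
      split
      · exact (reduceB_suffix cs rest).trans ⟨[t0, t1, t2], rfl⟩
      · exact List.suffix_refl _

theorem reduce_corr (cs : List Char) : ∀ (st : List Int),
    (∀ j ∈ st, 0 ≤ j ∧ j < (cs.length : Int)) →
    reduceA (st.map (keyA cs) ++ [('-', -1)]) = (reduceB cs st).map (keyA cs) ++ [('-', -1)]
  | [], _ => rfl
  | [_], _ => rfl
  | [_, _], _ => rfl
  | t0 :: t1 :: t2 :: rest, h => by
      have h0 := h t0 (by simp); have h1 := h t1 (by simp); have h2 := h t2 (by simp)
      have hn0 : t0.toNat < cs.length := by omega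
      have hn1 : t1.toNat < cs.length := by omega
      have hn2 : t2.toNat < cs.length := by omega
      have e2 : (PySem.List.pyGet? cs t2 == some '1') = (cs.getD t2.toNat ' ' == '1') := by
        rw [PySem.List.pyGet?_eq_some_getElem cs h2.1 h2.2, List.getD_eq_getElem cs ' ' hn2]
        simp
      have e1 : (PySem.List.pyGet? cs t1 == some '0') = (cs.getD t1.toNat ' ' == '0') := by
        rw [PySem.List.pyGet?_eq_some_getElem cs h1.1 h1.2, List.getD_eq_getElem cs ' ' hn1]
        simp
      have e0 : (PySem.List.pyGet? cs t0 == some '0') = (cs.getD t0.toNat ' ' == '0') := by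
        rw [PySem.List.pyGet?_eq_some_getElem cs h0.1 h0.2, List.getD_eq_getElem cs ' ' hn0]
        simp
      simp only [List.map_cons, List.cons_append, keyA, reduceA, reduceB, cond3, e2, e1, e0]
      by_cases hcond : (cs.getD t2.toNat ' ' == '1' && cs.getD t1.toNat ' ' == '0'
          && cs.getD t0.toNat ' ' == '0') = true
      · rw [if_pos hcond, if_pos hcond]
        exact reduce_corr cs rest (fun j hj => h j (by simp [hj]))
      · rw [if_neg hcond, if_neg hcond]
        simp [keyA]

-- head of A's stack carries the index B's stack carries (or the sentinel's -1)
theorem mapHeadD (cs : List Char) (L : List Int) :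
    ((L.map (keyA cs) ++ [('-', -1)]).headD ('-', -1)).2 = L.headD (-1) := by
  cases L <;> rfl

-- one loop step preserves 'A's running maximum = widest boundary gap'
theorem stepMax (k : Int) (stB stB' : List Int) (hsuf : stB' <:+ k :: stB)
    (hpw : List.Pairwise (fun x y => y < x) stB)
    (hbnd : ∀ j ∈ stB, 0 ≤ j ∧ j < k) (hk : 0 ≤ k) :
    max (maxGap (k :: stB ++ [-1])) (k - stB'.headD (-1))
      = maxGap ((k + 1) :: stB' ++ [-1]) := by
  rcases List.suffix_cons_iff.mp hsuf with heq | hs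
  · subst heq
    simp only [List.headD_cons]
    have h1 : maxGap ((k + 1) :: (k :: stB) ++ [-1])
        = max ((k + 1) - k - 1) (maxGap (k :: stB ++ [-1])) := by
      simp only [List.cons_append, maxGap_cons_cons]
    have h2 := maxGap_nonneg (k :: stB ++ [-1])
    rw [h1]
    omega
  · obtain ⟨zs, hzs⟩ := hs
    cases stB' with
    | nil =>
      have hmerge := maxGap_merge stB k (-1) []
        (fun z hz => ⟨by have := (hbnd z hz).1; omega, (hbnd z hz).2⟩) (by omega) hpw
      have h0 : maxGap [(-1 : Int)] = 0 := rfl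
      rw [h0] at hmerge
      simp only [List.headD_nil]
      have h1 : maxGap (((k + 1) :: ([] : List Int)) ++ [-1]) = max ((k + 1) - (-1) - 1) 0 := rfl
      rw [h1]
      omega
    | cons t r =>
      have hpwB : List.Pairwise (fun x y => y < x) (zs ++ t :: r) := by
        rw [hzs]; exact hpw
      have hsplit := List.pairwise_append.mp hpwB
      have hmerge := maxGap_merge zs k t (r ++ [-1])
        (fun z hz => ⟨hsplit.2.2 z hz t (by simp),
          (hbnd z (by rw [← hzs]; exact List.mem_append_left _ hz)).2⟩)
        ((hbnd t (by rw [← hzs]; simp)).2) hsplit.1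
      have hshape : k :: stB ++ [-1] = k :: zs ++ t :: (r ++ [-1]) := by
        rw [← hzs]; simp
      rw [hshape]
      simp only [List.cons_append] at hmerge
      simp only [List.headD_cons, List.cons_append, maxGap_cons_cons]
      omega

-- main loop invariant: A's accumulator equals the widest gap of the left fold's boundary list
theorem mainInv (cs : List Char) : ∀ (rest : List Char) (k : Nat) (mA : List (Char × Int)) (maxA : Int) (stB : List Int),
    cs.drop k = rest → k ≤ cs.length →
    List.Pairwise (fun x y => y < x) stB →
    (∀ j ∈ stB, 0 ≤ j ∧ j < (k : Int)) →
    mA = stB.map (keyA cs) ++ [('-', -1)] →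
    maxA = maxGap ((k : Int) :: stB ++ [-1]) →
    ((PySem.List.enumerate rest (k : Int)).foldl stepA (mA, maxA)).2
      = maxGap ((cs.length : Int) :: ((PySem.List.enumerate rest (k : Int)).foldl (stepB cs) stB) ++ [-1]) := by
  intro rest
  induction rest with
  | nil =>
    intro k mA maxA stB hdrop hk _ _ _ hmax
    have hlen : cs.length - k = 0 := by
      have := congrArg List.length hdrop; simpa using this
    have hkeq : (k : Int) = (cs.length : Int) := by omega
    simp only [PySem.List.enumerate_nil, List.foldl_nil]
    rw [hmax, hkeq]
  | cons c rest ih =>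
    intro k mA maxA stB hdrop hk hpw hbnd hm hmax
    have hklt : k < cs.length := by
      by_contra hcon
      rw [List.drop_eq_nil_of_le (by omega)] at hdrop
      cases hdrop
    have hdrop' : cs.drop (k + 1) = rest := by
      have := congrArg List.tail hdrop
      simpa [List.tail_drop] using this
    have hg : cs[k]? = some c := by
      have h := congrArg (fun l => l[0]?) hdrop
      simpa [List.getElem?_drop] using h
    have hck : cs.getD k ' ' = c := by
      simp [List.getD_eq_getElem?_getD, hg]
    have hkey : keyA cs (k : Int) = (c, (k : Int)) := by
      simp only [keyA, Int.toNat_natCast]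
      rw [hck]
    rw [PySem.List.enumerate_cons]
    simp only [List.foldl_cons]
    have hstepB : stepB cs stB ((k : Int), c) = reduceB cs ((k : Int) :: stB) := rfl
    rw [hstepB]
    have hbnd' : ∀ j ∈ ((k : Int) :: stB), 0 ≤ j ∧ j < (cs.length : Int) := by
      intro j hj
      rcases List.mem_cons.mp hj with hh | hh
      · subst hh; exact ⟨by omega, by omega⟩
      · have := hbnd j hh
        exact ⟨this.1, by have h2 := this.2; omega⟩
    have hcorr := reduce_corr cs ((k : Int) :: stB) hbnd'
    have hA1 : stepA (mA, maxA) ((k : Int), c)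
        = (reduceA ((c, (k : Int)) :: mA),
           max maxA ((k : Int) - ((reduceA ((c, (k : Int)) :: mA)).headD ('-', -1)).2)) := rfl
    have hpush : (c, (k : Int)) :: mA = ((k : Int) :: stB).map (keyA cs) ++ [('-', -1)] := by
      rw [hm]; simp [hkey]
    rw [hA1, hpush, hcorr, mapHeadD]
    have hsuf := reduceB_suffix cs ((k : Int) :: stB)
    have hpwk : List.Pairwise (fun x y => y < x) ((k : Int) :: stB) := by
      rw [List.pairwise_cons]
      exact ⟨fun j hj => (hbnd j hj).2, hpw⟩
    have hpw' := hpwk.sublist hsuf.sublist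
    have hbnd'' : ∀ j ∈ reduceB cs ((k : Int) :: stB), 0 ≤ j ∧ j < ((k + 1 : Nat) : Int) := by
      intro j hj
      rcases List.mem_cons.mp (hsuf.subset hj) with hh | hh
      · subst hh; exact ⟨by omega, by omega⟩
      · have := hbnd j hh
        exact ⟨this.1, by have h2 := this.2; omega⟩
    have hmaxeq := stepMax (k : Int) stB (reduceB cs ((k : Int) :: stB)) hsuf hpw hbnd (by omega)
    rw [hmax, hmaxeq]
    have hcast : ((k : Int) + 1) = ((k + 1 : Nat) : Int) := by push_cast; ring
    rw [hcast]
    exact ih (k + 1) _ _ _ hdrop' (by omega) hpw' hbnd'' rfl rfl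

-- ===== the left-to-right fold equals the right-to-left fold (no-critical-pair confluence) =====

theorem rstepB_cons (cs : List Char) (i a b : Int) (t : List Int) :
    rstepB cs i (a :: b :: t) = if cond3 cs i a b then t else i :: a :: b :: t := rfl

theorem rstepB_nil (cs : List Char) (i : Int) : rstepB cs i [] = [i] := rfl

theorem rstepB_one (cs : List Char) (i a : Int) : rstepB cs i [a] = [i, a] := rfl

theorem cond3_parts (cs : List Char) (a b c : Int) (h : cond3 cs a b c = true) :
    PySem.List.pyGet? cs a = some '1' ∧ PySem.List.pyGet? cs b = some '0'
      ∧ PySem.List.pyGet? cs c = some '0' := by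
  simp only [cond3, Bool.and_eq_true, beq_iff_eq] at h
  exact ⟨h.1.1, h.1.2, h.2⟩

theorem cond3_false_of_zero (cs : List Char) (a b c : Int)
    (h : PySem.List.pyGet? cs a = some '0') : cond3 cs a b c = false := by
  simp [cond3, h]

theorem irrD_tail (cs : List Char) (a : Int) : ∀ (l : List Int),
    irrD cs (a :: l) = true → irrD cs l = true
  | [], _ => rfl
  | [_], _ => rfl
  | b :: c :: r, h => by
      simp only [irrD, Bool.and_eq_true] at h
      exact h.2

theorem irrD_append_left (cs : List Char) : ∀ (xs ys : List Int),
    irrD cs (xs ++ ys) = true → irrD cs xs = true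
  | [], _, _ => rfl
  | [_], _, _ => rfl
  | [_, _], _, _ => rfl
  | a :: b :: c :: r, ys, h => by
      simp only [List.cons_append] at h
      simp only [irrD, Bool.and_eq_true] at h ⊢
      exact ⟨h.1, irrD_append_left cs (b :: c :: r) ys h.2⟩

theorem irrD_last (cs : List Char) : ∀ (u : List Int) (p x j : Int),
    irrD cs (u ++ [p, x, j]) = true → cond3 cs j x p = false
  | [], p, x, j, h => by
      simp only [List.nil_append, irrD, Bool.and_eq_true, Bool.not_eq_true'] at h
      exact h.1
  | a :: u, p, x, j, h => by
      have := irrD_tail cs a (u ++ [p, x, j]) (by simpa using h)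
      exact irrD_last cs u p x j this

theorem reduceB_irr (cs : List Char) : ∀ (st : List Int),
    irrD cs st = true → reduceB cs st = st
  | [], _ => rfl
  | [_], _ => rfl
  | [_, _], _ => rfl
  | t0 :: t1 :: t2 :: r, h => by
      simp only [irrD, Bool.and_eq_true, Bool.not_eq_true'] at h
      simp only [reduceB, h.1, Bool.false_eq_true, if_false]

theorem pushB_eq (cs : List Char) : ∀ (st : List Int) (j : Int),
    irrD cs st = true → pushB cs st j = push1 cs st j
  | [], j, _ => rfl
  | [t0], j, _ => rfl
  | t0 :: t1 :: r, j, h => by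
      simp only [pushB, reduceB, push1]
      by_cases hc : cond3 cs t1 t0 j = true
      · simp only [hc, if_true]
        exact reduceB_irr cs r (irrD_tail cs t1 r (irrD_tail cs t0 (t1 :: r) h))
      · simp only [hc, Bool.false_eq_true, if_false]

-- a redex waiting at the very bottom: j below p,x is removed exactly when the upper
-- stack has been consumed; stated as a commuting equation for the whole remaining fold
theorem bot2 (cs : List Char) (j x p : Int) (hxp : cond3 cs j x p = true) :
    ∀ (idxs : List Int) (st : List Int), irrD cs (st ++ [p, x]) = true →
      rstepB cs j ((List.foldl (pushB cs) (st ++ [p, x]) idxs).reverse)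
        = (List.foldl (pushB cs) st idxs).reverse := by
  intro idxs
  induction idxs with
  | nil =>
    intro st _
    simp only [List.foldl_nil, List.reverse_append, List.reverse_cons, List.reverse_nil,
      List.nil_append, List.cons_append]
    rw [rstepB_cons, if_pos hxp]
  | cons q idxs ih =>
    intro st hirr
    have hst : irrD cs st = true := irrD_append_left cs st [p, x] hirr
    simp only [List.foldl_cons]
    rw [pushB_eq cs st q hst, pushB_eq cs (st ++ [p, x]) q hirr]
    obtain ⟨_, hx0, hp0⟩ := cond3_parts cs j x p hxp
    match st with
    | t0 :: t1 :: r =>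
      simp only [push1, List.cons_append]
      by_cases hc : cond3 cs t1 t0 q = true
      · simp only [hc, if_true]
        exact ih r (irrD_tail cs t1 _ (irrD_tail cs t0 _ (by simpa using hirr)))
      · simp only [hc, Bool.false_eq_true, if_false]
        have : irrD cs ((q :: t0 :: t1 :: r) ++ [p, x]) = true := by
          simp only [List.cons_append, irrD, Bool.and_eq_true, Bool.not_eq_true']
          exact ⟨by simpa using hc, by simpa using hirr⟩
        exact ih (q :: t0 :: t1 :: r) this
    | [t0] =>
      have hc1 : cond3 cs p t0 q = false := cond3_false_of_zero cs p t0 q hp0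
      have hc2 : cond3 cs x p t0 = false := cond3_false_of_zero cs x p t0 hx0
      show rstepB cs j ((List.foldl (pushB cs) (push1 cs [t0, p, x] q) idxs).reverse)
          = (List.foldl (pushB cs) (push1 cs [t0] q) idxs).reverse
      simp only [push1, hc1, Bool.false_eq_true, if_false]
      have : irrD cs ((q :: [t0]) ++ [p, x]) = true := by
        simp only [List.cons_append, List.nil_append, irrD, Bool.and_eq_true, Bool.not_eq_true']
        exact ⟨hc1, hc2, trivial⟩
      exact ih (q :: [t0]) this
    | [] =>
      have hc2 : cond3 cs x p q = false := cond3_false_of_zero cs x p q hx0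
      show rstepB cs j ((List.foldl (pushB cs) (push1 cs [p, x] q) idxs).reverse)
          = (List.foldl (pushB cs) (push1 cs [] q) idxs).reverse
      simp only [push1, hc2, Bool.false_eq_true, if_false]
      have : irrD cs ((q :: ([] : List Int)) ++ [p, x]) = true := by
        simp only [List.cons_append, List.nil_append, irrD, Bool.and_eq_true, Bool.not_eq_true']
        exact ⟨hc2, trivial⟩
      exact ih [q] this

-- a single element at the very bottom commutes with the whole remaining fold
theorem bot (cs : List Char) (j : Int) :
    ∀ (idxs : List Int) (st : List Int), irrD cs (st ++ [j]) = true →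
      (List.foldl (pushB cs) (st ++ [j]) idxs).reverse
        = rstepB cs j ((List.foldl (pushB cs) st idxs).reverse) := by
  intro idxs
  induction idxs with
  | nil =>
    intro st hirr
    simp only [List.foldl_nil, List.reverse_append, List.reverse_cons, List.reverse_nil,
      List.nil_append, List.cons_append]
    match hrev : st.reverse with
    | [] => rw [rstepB_nil]
    | [a] => rw [rstepB_one]
    | x :: p :: w =>
      have hst : st = w.reverse ++ [p, x] := by
        have := congrArg List.reverse hrev
        simpa using this
      have hform : st ++ [j] = w.reverse ++ [p, x, j] := by rw [hst]; simp
      have hcf : cond3 cs j x p = false := irrD_last cs w.reverse p x j (hform ▸ hirr)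
      rw [rstepB_cons, if_neg (by simp [hcf])]
  | cons q idxs ih =>
    intro st hirr
    have hst : irrD cs st = true := irrD_append_left cs st [j] hirr
    simp only [List.foldl_cons]
    rw [pushB_eq cs st q hst, pushB_eq cs (st ++ [j]) q hirr]
    match st with
    | t0 :: t1 :: r =>
      simp only [push1, List.cons_append]
      by_cases hc : cond3 cs t1 t0 q = true
      · simp only [hc, if_true]
        exact ih r (irrD_tail cs t1 _ (irrD_tail cs t0 _ (by simpa using hirr)))
      · simp only [hc, Bool.false_eq_true, if_false]
        have : irrD cs ((q :: t0 :: t1 :: r) ++ [j]) = true := by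
          simp only [List.cons_append, irrD, Bool.and_eq_true, Bool.not_eq_true']
          exact ⟨by simpa using hc, by simpa using hirr⟩
        exact ih (q :: t0 :: t1 :: r) this
    | [t0] =>
      show (List.foldl (pushB cs) (push1 cs [t0, j] q) idxs).reverse
          = rstepB cs j ((List.foldl (pushB cs) (push1 cs [t0] q) idxs).reverse)
      by_cases hc : cond3 cs j t0 q = true
      · simp only [push1, hc, if_true]
        exact (bot2 cs j t0 q hc idxs [] (by simp [irrD])).symm
      · simp only [push1, hc, Bool.false_eq_true, if_false]
        have : irrD cs ((q :: [t0]) ++ [j]) = true := by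
          simp only [List.cons_append, List.nil_append, irrD, Bool.and_eq_true, Bool.not_eq_true']
          exact ⟨by simpa using hc, trivial⟩
        exact ih (q :: [t0]) this
    | [] =>
      show (List.foldl (pushB cs) (push1 cs [j] q) idxs).reverse
          = rstepB cs j ((List.foldl (pushB cs) (push1 cs [] q) idxs).reverse)
      simp only [push1]
      exact ih [q] (by simp [irrD])

-- the reversal of A's left-to-right stack is B's right-to-left stack
theorem lr_eq_rl (cs : List Char) : ∀ (idxs : List Int),
    (List.foldl (pushB cs) [] idxs).reverse = List.foldr (rstepB cs) [] idxs := by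
  intro idxs
  induction idxs with
  | nil => rfl
  | cons j idxs ih =>
    have h0 : pushB cs [] j = ([] : List Int) ++ [j] := rfl
    rw [List.foldl_cons, List.foldr_cons, h0, bot cs j idxs [] (by simp [irrD]), ih]

-- ===== VERDICT (by name: the statement is the Claim_ definition above) =====
theorem longestNull_spec : Claim_equal_longestNull := by
  intro S _
  unfold Spec_longestNull longestNull longestNull_alt
  have h := mainInv S.toList S.toList 0 [('-', -1)] 0 [] (by simp) (by simp) (by simp)
    (by simp) (by simp) (by decide)
  simp only [Nat.cast_zero] at h
  rw [h]
  -- the left fold over the enumeration is the left fold of pushB over the index range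
  have hfold : (PySem.List.enumerate S.toList 0).foldl (stepB S.toList) []
      = List.foldl (pushB S.toList) [] (PySem.List.pyRange 0 (S.toList.length : Int) 1) := by
    have hmap := PySem.List.map_fst_enumerate S.toList (0 : Int)
    rw [show ((0 : Int) + S.toList.length) = (S.toList.length : Int) by omega] at hmap
    rw [← hmap, List.foldl_map]
    rfl
  rw [hfold]
  set idxs := PySem.List.pyRange 0 (S.toList.length : Int) 1 with hidxs
  have hrl := lr_eq_rl S.toList idxs
  have hrev : List.foldl (pushB S.toList) [] idxs
      = (List.foldr (rstepB S.toList) [] idxs).reverse := by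
    rw [← hrl, List.reverse_reverse]
  rw [hrev, gapFold _ 0 (-1) le_rfl]
  have hshape : (((-1 : Int) :: (List.foldr (rstepB S.toList) [] idxs
        ++ [(S.toList.length : Int)])).reverse)
      = (S.toList.length : Int) :: (List.foldr (rstepB S.toList) [] idxs).reverse ++ [-1] := by
    simp
  rw [hshape]
  exact (max_eq_right (maxGap_nonneg _)).symm
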